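-- pv_equiv track=rewrite | github.com/asimrout-eng/firebolt-cdc-lambda | lambda/mysql_firebolt_type_mapping.py | is_type_compatible
-- ===== SOURCE A (Python) =====
-- def normalize_type(data_type: str) -> str:
--     """
--     Normalize a type string to base type (without precision/scale).
--
--     Examples:
--         VARCHAR(255) -> VARCHAR
--         DECIMAL(10,2) -> DECIMAL
--         INT UNSIGNED -> INT UNSIGNED
--     """
--     if not data_type:
--         return 'UNKNOWN'
--
--     # Uppercase and strip
--     dtype = data_type.upper().strip()
--
--     # Handle UNSIGNED suffix specially
--     if ' UNSIGNED' in dtype: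
--         base = dtype.split('(')[0].strip()
--         return base
--
--     # Remove precision/scale
--     base = dtype.split('(')[0].strip()
--     return base
--
-- def is_type_compatible(source_type: str, target_type: str) -> bool:
--     """
--     Check if source type is compatible with target type (for MERGE operations).
--
--     Compatible means data can be safely transferred without loss.
--     """
--     src_base = normalize_type(source_type)
--     tgt_base = normalize_type(target_type)
--
--     # Same base type is always compatible
--     if src_base == tgt_base:
--         return True
--
--     # Define compatible type families
--     compatible_groups = [
--         {'TEXT', 'VARCHAR', 'STRING', 'CHAR', 'NCHAR', 'NVARCHAR'},
--         {'INTEGER', 'INT', 'SMALLINT', 'TINYINT', 'MEDIUMINT'},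
--         {'BIGINT', 'INT64'},
--         {'DOUBLE', 'FLOAT', 'REAL', 'FLOAT64', 'FLOAT32'},
--         {'BOOLEAN', 'BOOL', 'BIT'},
--         {'TIMESTAMP', 'TIMESTAMPTZ', 'DATETIME'},
--         {'NUMERIC', 'DECIMAL', 'DEC', 'NUMBER'},
--     ]
--
--     for group in compatible_groups:
--         if src_base in group and tgt_base in group:
--             return True
--
--     return False
-- ===== SOURCE B (Python) =====
-- def normalize_type(data_type: str) -> str:
--     if not data_type:
--         return 'UNKNOWN'
--     dtype = data_type.upper().strip()
--     if ' UNSIGNED' in dtype: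
--         base = dtype.split('(')[0].strip()
--         return base
--     base = dtype.split('(')[0].strip()
--     return base
--
-- _COMPATIBLE_GROUPS = [
--     ['TEXT', 'VARCHAR', 'STRING', 'CHAR', 'NCHAR', 'NVARCHAR'],
--     ['INTEGER', 'INT', 'SMALLINT', 'TINYINT', 'MEDIUMINT'],
--     ['BIGINT', 'INT64'],
--     ['DOUBLE', 'FLOAT', 'REAL', 'FLOAT64', 'FLOAT32'],
--     ['BOOLEAN', 'BOOL', 'BIT'],
--     ['TIMESTAMP', 'TIMESTAMPTZ', 'DATETIME'],
--     ['NUMERIC', 'DECIMAL', 'DEC', 'NUMBER'],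
-- ]
--
-- _GROUP_INDEX = {}
-- for _i, _group in enumerate(_COMPATIBLE_GROUPS):
--     for _t in _group:
--         _GROUP_INDEX[_t] = _i
--
-- def is_type_compatible(source_type: str, target_type: str) -> bool:
--     src_base = normalize_type(source_type)
--     tgt_base = normalize_type(target_type)
--     if src_base == tgt_base:
--         return True
--     si = _GROUP_INDEX.get(src_base)
--     ti = _GROUP_INDEX.get(tgt_base)
--     return si is not None and si == ti
-- ===== Notes on version B (the rewrite author's own statement) =====
-- stated objective: idiomatic
-- what changed: Replaced A's per-call scan over the list of compatibility-group sets with a module-level type->group-index dictionary built once, so the compatibility check becomes two dictionary lookups compared for equality (the equal-base guard kept first).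
import Mathlib
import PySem

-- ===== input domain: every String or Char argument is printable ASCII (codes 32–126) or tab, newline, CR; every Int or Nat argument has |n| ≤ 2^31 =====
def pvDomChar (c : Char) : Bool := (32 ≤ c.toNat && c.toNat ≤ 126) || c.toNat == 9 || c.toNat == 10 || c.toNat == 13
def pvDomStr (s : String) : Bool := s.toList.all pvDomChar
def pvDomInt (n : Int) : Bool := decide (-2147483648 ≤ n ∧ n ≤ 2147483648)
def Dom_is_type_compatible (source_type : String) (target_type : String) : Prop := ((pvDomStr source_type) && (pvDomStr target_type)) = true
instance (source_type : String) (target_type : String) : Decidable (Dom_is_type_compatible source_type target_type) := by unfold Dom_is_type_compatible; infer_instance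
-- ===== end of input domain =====

-- B replaces A's per-call scan over the 7 compatibility groups by a module-level
-- type→group-index dictionary built once, so the check becomes two O(1) lookups
-- (objective: idiomatic; same observable behaviour).

-- ===== PORT A =====
-- shared helper: both A and B use normalize_type verbatim (B keeps it as-is).
-- dtype.split('(')[0] never raises: split with a nonempty separator is nonempty,
-- so the total pyGetD with default "" is exact here.
def normalize_type (data_type : String) : String :=
  if data_type == "" then "UNKNOWN"
  else
    let dtype := PySem.Str.strip (PySem.Str.upper data_type)
    if PySem.Str.isIn " UNSIGNED" dtype then
      PySem.Str.strip (PySem.List.pyGetD ((PySem.Str.split? dtype "(").getD []) 0 "")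
    else
      PySem.Str.strip (PySem.List.pyGetD ((PySem.Str.split? dtype "(").getD []) 0 "")

def is_type_compatible (source_type : String) (target_type : String) : Bool :=
  let src_base := normalize_type source_type
  let tgt_base := normalize_type target_type
  if src_base == tgt_base then true
  else
    let compatible_groups : List (PySem.Set String) := [
      PySem.Set.ofList ["TEXT", "VARCHAR", "STRING", "CHAR", "NCHAR", "NVARCHAR"],
      PySem.Set.ofList ["INTEGER", "INT", "SMALLINT", "TINYINT", "MEDIUMINT"],
      PySem.Set.ofList ["BIGINT", "INT64"],
      PySem.Set.ofList ["DOUBLE", "FLOAT", "REAL", "FLOAT64", "FLOAT32"],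
      PySem.Set.ofList ["BOOLEAN", "BOOL", "BIT"],
      PySem.Set.ofList ["TIMESTAMP", "TIMESTAMPTZ", "DATETIME"],
      PySem.Set.ofList ["NUMERIC", "DECIMAL", "DEC", "NUMBER"]]
    compatible_groups.any (fun group =>
      PySem.Set.contains group src_base && PySem.Set.contains group tgt_base)

-- ===== PORT B =====
def pvCompatibleGroups : List (List String) := [
  ["TEXT", "VARCHAR", "STRING", "CHAR", "NCHAR", "NVARCHAR"],
  ["INTEGER", "INT", "SMALLINT", "TINYINT", "MEDIUMINT"],
  ["BIGINT", "INT64"],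
  ["DOUBLE", "FLOAT", "REAL", "FLOAT64", "FLOAT32"],
  ["BOOLEAN", "BOOL", "BIT"],
  ["TIMESTAMP", "TIMESTAMPTZ", "DATETIME"],
  ["NUMERIC", "DECIMAL", "DEC", "NUMBER"]]

-- module-level dict: for _i, _group in enumerate(...): for _t in _group: d[_t] = _i
def pvGroupIndex : PySem.Dict String Int :=
  (PySem.List.enumerate pvCompatibleGroups 0).foldl
    (fun d ig => ig.2.foldl (fun d t => d.insert t ig.1) d) PySem.Dict.empty

def is_type_compatible_alt (source_type : String) (target_type : String) : Bool :=
  let src_base := normalize_type source_type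
  let tgt_base := normalize_type target_type
  if src_base == tgt_base then true
  else
    let si := pvGroupIndex.get? src_base
    let ti := pvGroupIndex.get? tgt_base
    si.isSome && si == ti

-- ===== PRECONDITION & SPEC =====
def Spec_is_type_compatible (source_type : String) (target_type : String) (out : Bool) : Prop := out = is_type_compatible_alt source_type target_type
instance (source_type : String) (target_type : String) (out : Bool) : Decidable (Spec_is_type_compatible source_type target_type out) := by unfold Spec_is_type_compatible; infer_instance

-- ===== CLAIM (what is proved, stated in full; the proofs are below) =====
def Claim_equal_is_type_compatible : Prop := ∀ (source_type : String) (target_type : String), Dom_is_type_compatible source_type target_type → Spec_is_type_compatible source_type target_type (is_type_compatible source_type target_type)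

-- ===== LEMMAS AND PROOFS =====

-- inner loop: inserting every key of a group g with the same value i
theorem pvGet_inner (g : List String) (d : PySem.Dict String Int) (i : Int) (a : String) :
    (g.foldl (fun d t => d.insert t i) d).get? a
      = if a ∈ g then some i else d.get? a := by
  induction g generalizing d with
  | nil => simp
  | cons t g ih =>
    simp only [List.foldl_cons, ih, List.mem_cons]
    by_cases ht : t = a
    · subst ht
      by_cases h : t ∈ g
      · simp [h]
      · simp
    · have hne : ¬ a = t := fun he => ht he.symm
      by_cases h : a ∈ g
      · simp [h]
      · simp [h, hne, PySem.Dict.get?_insert]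

theorem pvContains_inner (g : List String) (d : PySem.Dict String Int) (i : Int) (a : String) :
    (g.foldl (fun d t => d.insert t i) d).contains a
      = (decide (a ∈ g) || d.contains a) := by
  rw [PySem.Dict.contains_eq_isSome_get?, pvGet_inner, PySem.Dict.contains_eq_isSome_get?]
  by_cases h : a ∈ g <;> simp [h]

-- outer loop over the enumerated groups: the final lookup is the index of the
-- (unique) group containing the key, provided the groups are pairwise disjoint
-- and fresh w.r.t. the accumulator dict
theorem pvGet_outer (ps : List (Int × List String)) (d : PySem.Dict String Int) (a : String)
    (hfresh : ∀ p ∈ ps, ∀ t ∈ p.2, d.contains t = false)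
    (hdisj : ps.Pairwise (fun p q => ∀ t ∈ p.2, t ∉ q.2)) :
    (ps.foldl (fun d ig => ig.2.foldl (fun d t => d.insert t ig.1) d) d).get? a
      = (match ps.find? (fun p => decide (a ∈ p.2)) with
          | some p => some p.1
          | none => d.get? a) := by
  induction ps generalizing d with
  | nil => simp
  | cons p ps ih =>
    simp only [List.foldl_cons]
    rw [List.pairwise_cons] at hdisj
    by_cases h : a ∈ p.2
    · rw [List.find?_cons_of_pos (by simpa using h)]
      have hnone : ps.find? (fun q => decide (a ∈ q.2)) = none :=
        List.find?_eq_none.mpr (fun q hq => by simp [hdisj.1 q hq a h])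
      rw [ih]
      · simp [hnone, pvGet_inner, h]
      · intro q hq t htq
        rw [pvContains_inner]
        have h2 : t ∉ p.2 := fun hp => hdisj.1 q hq t hp htq
        simp [h2, hfresh q (by simp [hq]) t htq]
      · exact hdisj.2
    · rw [List.find?_cons_of_neg (by simpa using h)]
      rw [ih]
      · have hda : (p.2.foldl (fun d t => d.insert t p.1) d).get? a = d.get? a := by
          rw [pvGet_inner]; simp [h]
        cases ps.find? (fun q => decide (a ∈ q.2)) <;> simp [hda]
      · intro q hq t htq
        rw [pvContains_inner]
        have h2 : t ∉ p.2 := fun hp => hdisj.1 q hq t hp htq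
        simp [h2, hfresh q (by simp [hq]) t htq]
      · exact hdisj.2

-- A's scanning loop equals the pair of indexed lookups, for pairwise-disjoint
-- groups with pairwise distinct indices
theorem pvAny_eq_find (ps : List (Int × List String)) (a b : String)
    (hdisj : ps.Pairwise (fun p q => ∀ t ∈ p.2, t ∉ q.2))
    (hidx : ps.Pairwise (fun p q => p.1 ≠ q.1)) :
    (ps.any fun p => decide (a ∈ p.2) && decide (b ∈ p.2))
      = (match ps.find? (fun p => decide (a ∈ p.2)), ps.find? (fun p => decide (b ∈ p.2)) with
          | some p, some q => p.1 == q.1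
          | _, _ => false) := by
  induction ps with
  | nil => simp
  | cons p ps ih =>
    rw [List.pairwise_cons] at hdisj hidx
    have hanyf : ∀ c hc : String, c ∈ p.2 →
        (ps.any fun q => decide (c ∈ q.2) && decide (hc ∈ q.2)) = false := by
      intro c hc hcp
      rw [List.any_eq_false]
      intro q hq
      simp [hdisj.1 q hq c hcp]
    have hanys : ∀ c hc : String, c ∈ p.2 →
        (ps.any fun q => decide (hc ∈ q.2) && decide (c ∈ q.2)) = false := by
      intro c hc hcp
      rw [List.any_eq_false]
      intro q hq
      simp [hdisj.1 q hq c hcp]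
    simp only [List.any_cons, List.find?_cons]
    by_cases ha : a ∈ p.2
    · by_cases hb : b ∈ p.2
      · simp [ha, hb]
      · cases hfb : ps.find? (fun q => decide (b ∈ q.2)) with
        | none => simp [ha, hb, hanyf a b ha]
        | some q =>
          have hne : p.1 ≠ q.1 := hidx.1 q (List.mem_of_find?_eq_some hfb)
          simp [ha, hb, hanyf a b ha, hne]
    · by_cases hb : b ∈ p.2
      · cases hfa : ps.find? (fun q => decide (a ∈ q.2)) with
        | none => simp [ha, hb, hanys b a hb]
        | some q =>
          have hne : p.1 ≠ q.1 := hidx.1 q (List.mem_of_find?_eq_some hfa)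
          simp [ha, hb, hanys b a hb, Ne.symm hne]
      · simp only [ha, hb, decide_false, Bool.and_false, Bool.false_or]
        exact ih hdisj.2 hidx.2

-- the literal enumerated group table
theorem pvEnum_eq : PySem.List.enumerate pvCompatibleGroups 0 =
    [(0, ["TEXT", "VARCHAR", "STRING", "CHAR", "NCHAR", "NVARCHAR"]),
     (1, ["INTEGER", "INT", "SMALLINT", "TINYINT", "MEDIUMINT"]),
     (2, ["BIGINT", "INT64"]),
     (3, ["DOUBLE", "FLOAT", "REAL", "FLOAT64", "FLOAT32"]),
     (4, ["BOOLEAN", "BOOL", "BIT"]),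
     (5, ["TIMESTAMP", "TIMESTAMPTZ", "DATETIME"]),
     (6, ["NUMERIC", "DECIMAL", "DEC", "NUMBER"])] := by decide

theorem pvDisj : (PySem.List.enumerate pvCompatibleGroups 0).Pairwise
    (fun p q => ∀ t ∈ p.2, t ∉ q.2) := by
  rw [pvEnum_eq]; decide

theorem pvIdx : (PySem.List.enumerate pvCompatibleGroups 0).Pairwise
    (fun p q => p.1 ≠ q.1) := by
  rw [pvEnum_eq]; decide

theorem pvGroupIndex_get? (a : String) :
    pvGroupIndex.get? a
      = (match (PySem.List.enumerate pvCompatibleGroups 0).find?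
            (fun p => decide (a ∈ p.2)) with
          | some p => some p.1
          | none => none) := by
  unfold pvGroupIndex
  rw [pvGet_outer _ _ _ (fun p _ t _ => by simp) pvDisj]
  cases (PySem.List.enumerate pvCompatibleGroups 0).find? (fun p => decide (a ∈ p.2)) <;> simp

-- A's literal list of sets is the enumerated table without the indices
theorem pvAside (a b : String) :
    (([PySem.Set.ofList ["TEXT", "VARCHAR", "STRING", "CHAR", "NCHAR", "NVARCHAR"],
       PySem.Set.ofList ["INTEGER", "INT", "SMALLINT", "TINYINT", "MEDIUMINT"],
       PySem.Set.ofList ["BIGINT", "INT64"],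
       PySem.Set.ofList ["DOUBLE", "FLOAT", "REAL", "FLOAT64", "FLOAT32"],
       PySem.Set.ofList ["BOOLEAN", "BOOL", "BIT"],
       PySem.Set.ofList ["TIMESTAMP", "TIMESTAMPTZ", "DATETIME"],
       PySem.Set.ofList ["NUMERIC", "DECIMAL", "DEC", "NUMBER"]] : List (PySem.Set String)).any
      (fun group => PySem.Set.contains group a && PySem.Set.contains group b))
    = ((PySem.List.enumerate pvCompatibleGroups 0).any
        fun p => decide (a ∈ p.2) && decide (b ∈ p.2)) := by
  rw [pvEnum_eq]
  simp [PySem.Set.contains, List.contains_eq_mem,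
    show PySem.Set.ofList ["TEXT", "VARCHAR", "STRING", "CHAR", "NCHAR", "NVARCHAR"]
      = ["TEXT", "VARCHAR", "STRING", "CHAR", "NCHAR", "NVARCHAR"] from by decide,
    show PySem.Set.ofList ["INTEGER", "INT", "SMALLINT", "TINYINT", "MEDIUMINT"]
      = ["INTEGER", "INT", "SMALLINT", "TINYINT", "MEDIUMINT"] from by decide,
    show PySem.Set.ofList ["BIGINT", "INT64"] = ["BIGINT", "INT64"] from by decide,
    show PySem.Set.ofList ["DOUBLE", "FLOAT", "REAL", "FLOAT64", "FLOAT32"]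
      = ["DOUBLE", "FLOAT", "REAL", "FLOAT64", "FLOAT32"] from by decide,
    show PySem.Set.ofList ["BOOLEAN", "BOOL", "BIT"] = ["BOOLEAN", "BOOL", "BIT"] from by decide,
    show PySem.Set.ofList ["TIMESTAMP", "TIMESTAMPTZ", "DATETIME"]
      = ["TIMESTAMP", "TIMESTAMPTZ", "DATETIME"] from by decide,
    show PySem.Set.ofList ["NUMERIC", "DECIMAL", "DEC", "NUMBER"]
      = ["NUMERIC", "DECIMAL", "DEC", "NUMBER"] from by decide]

theorem is_type_compatible_eq (a b : String) :
    is_type_compatible a b = is_type_compatible_alt a b := by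
  unfold is_type_compatible is_type_compatible_alt
  by_cases h : (normalize_type a == normalize_type b) = true
  · simp [h]
  · simp only [Bool.not_eq_true] at h
    simp only [h, Bool.false_eq_true, if_false]
    rw [pvAside, pvAny_eq_find _ _ _ pvDisj pvIdx,
      pvGroupIndex_get?, pvGroupIndex_get?]
    cases (PySem.List.enumerate pvCompatibleGroups 0).find?
        (fun p => decide (normalize_type a ∈ p.2)) with
    | none => simp
    | some p =>
      cases (PySem.List.enumerate pvCompatibleGroups 0).find?
          (fun p => decide (normalize_type b ∈ p.2)) <;> simp

-- ===== VERDICT (by name: the statement is the Claim_ definition above) =====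
theorem is_type_compatible_spec : Claim_equal_is_type_compatible := by
  intro s t _
  unfold Spec_is_type_compatible
  exact is_type_compatible_eq s t
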